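-- pv_equiv track=rewrite | github.com/xjenny2/genetics-svgs-final | functionsclinvar.py | checkascending
-- ===== SOURCE A (Python) =====
-- def checkascending(resultsraw, errors):
--     results = []
--     minimum = 0
--     for result in resultsraw:
--         if result[0] >= minimum:
--             minimum = result[0]
--             results.append(result)
--         elif result[0] < minimum:
--             errors.append("Error: %d not ascending from %d" % (result[0], minimum))
--     results = sorted(results)
--     return results, errors
-- ===== SOURCE B (Python) =====
-- def checkascending(resultsraw, errors):
--     # Precompute thresholds: prefix[i] = max(0, first components of entries before i).
--     prefix = [0]
--     for r in resultsraw: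
--         prefix.append(max(prefix[-1], r[0]))
--     results = []
--     for r, m in zip(resultsraw, prefix):
--         if r[0] >= m:
--             results.append(r)
--         else:
--             errors.append("Error: %d not ascending from %d" % (r[0], m))
--     results.sort()
--     return results, errors
-- ===== Notes on version B (the rewrite author's own statement) =====
-- stated objective: alternative
-- what changed: B replaces A's single stateful scan (running minimum mutated inside the loop) by a two-phase decomposition: first a prefix-maximum table of thresholds, then a stateless pass comparing each entry against its precomputed threshold.
import Mathlib
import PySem

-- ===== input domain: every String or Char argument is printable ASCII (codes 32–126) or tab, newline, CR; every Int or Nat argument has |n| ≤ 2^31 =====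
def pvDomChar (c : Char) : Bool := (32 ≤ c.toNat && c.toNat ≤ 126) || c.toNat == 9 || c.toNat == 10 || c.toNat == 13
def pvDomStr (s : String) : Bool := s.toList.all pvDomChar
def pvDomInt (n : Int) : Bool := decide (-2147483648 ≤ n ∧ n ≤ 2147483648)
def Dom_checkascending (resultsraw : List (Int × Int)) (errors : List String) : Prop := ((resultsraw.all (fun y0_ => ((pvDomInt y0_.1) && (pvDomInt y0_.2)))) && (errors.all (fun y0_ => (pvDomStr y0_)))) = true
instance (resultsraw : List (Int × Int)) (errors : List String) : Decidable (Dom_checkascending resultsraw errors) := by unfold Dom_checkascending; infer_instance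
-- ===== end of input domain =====

-- B replaces A's single stateful scan by a prefix-maximum threshold table plus a stateless pass
-- (objective: alternative decomposition). Note: the Python A and B both mutate `errors` in place by
-- appending; the equivalence proved here is about the returned pair (which contains the final list).

-- ===== PORT A =====
-- A's loop: state (results, minimum, errors); branches in source order.
def checkascending (resultsraw : List (Int × Int)) (errors : List String) : (List (Int × Int)) × List String :=
  let st := resultsraw.foldl
    (fun (st : List (Int × Int) × Int × List String) result =>
      if result.1 ≥ st.2.1 then
        (st.1 ++ [result], result.1, st.2.2)
      else if result.1 < st.2.1 then
        (st.1, st.2.1, st.2.2 ++ ["Error: " ++ PySem.Int.toStr result.1 ++ " not ascending from " ++ PySem.Int.toStr st.2.1])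
      else st)
    ([], 0, errors)
  (PySem.List.sorted2 st.1 (fun r => r.1) (fun r => r.2), st.2.2)

-- ===== PORT B =====
-- Source B's first loop: prefix-maximum table (prefix[0] = 0, prefix[i+1] = max(prefix[i], r_i[0])).
def pvPrefix (m : Int) : List (Int × Int) → List Int
  | [] => [m]
  | r :: t => m :: pvPrefix (max m r.1) t

def checkascending_alt (resultsraw : List (Int × Int)) (errors : List String) : (List (Int × Int)) × List String :=
  let pfx := pvPrefix 0 resultsraw
  let st := (resultsraw.zip pfx).foldl
    (fun (st : List (Int × Int) × List String) (p : (Int × Int) × Int) =>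
      if p.1.1 ≥ p.2 then (st.1 ++ [p.1], st.2)
      else (st.1, st.2 ++ ["Error: " ++ PySem.Int.toStr p.1.1 ++ " not ascending from " ++ PySem.Int.toStr p.2]))
    ([], errors)
  (PySem.List.sorted2 st.1 (fun r => r.1) (fun r => r.2), st.2)

-- ===== PRECONDITION & SPEC =====
def Spec_checkascending (resultsraw : List (Int × Int)) (errors : List String) (out : (List (Int × Int)) × List String) : Prop := out = checkascending_alt resultsraw errors
instance (resultsraw : List (Int × Int)) (errors : List String) (out : (List (Int × Int)) × List String) : Decidable (Spec_checkascending resultsraw errors out) := by unfold Spec_checkascending; infer_instance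

-- ===== CLAIM (what is proved, stated in full; the proofs are below) =====
def Claim_equal_checkascending : Prop := ∀ (resultsraw : List (Int × Int)) (errors : List String), Dom_checkascending resultsraw errors → Spec_checkascending resultsraw errors (checkascending resultsraw errors)

-- ===== LEMMAS AND PROOFS =====

-- Loop invariant: A's fold from minimum m produces the same kept list and error list as B's
-- stateless pass against the thresholds pvPrefix m rs.
theorem pv_loop_eq (rs : List (Int × Int)) : ∀ (res : List (Int × Int)) (m : Int) (errs : List String),
    (let t := rs.foldl
      (fun (st : List (Int × Int) × Int × List String) result =>
        if result.1 ≥ st.2.1 then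
          (st.1 ++ [result], result.1, st.2.2)
        else if result.1 < st.2.1 then
          (st.1, st.2.1, st.2.2 ++ ["Error: " ++ PySem.Int.toStr result.1 ++ " not ascending from " ++ PySem.Int.toStr st.2.1])
        else st)
      (res, m, errs)
     (t.1, t.2.2)) =
    (rs.zip (pvPrefix m rs)).foldl
      (fun (st : List (Int × Int) × List String) (p : (Int × Int) × Int) =>
        if p.1.1 ≥ p.2 then (st.1 ++ [p.1], st.2)
        else (st.1, st.2 ++ ["Error: " ++ PySem.Int.toStr p.1.1 ++ " not ascending from " ++ PySem.Int.toStr p.2]))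
      (res, errs) := by
  induction rs with
  | nil => intro res m errs; simp [pvPrefix]
  | cons r t ih =>
    intro res m errs
    simp only [pvPrefix, List.zip_cons_cons, List.foldl_cons]
    by_cases h : r.1 ≥ m
    · have hmax : max m r.1 = r.1 := by omega
      simpa [h, hmax] using ih (res ++ [r]) r.1 errs
    · have hlt : r.1 < m := by omega
      have hmax : max m r.1 = m := by omega
      simpa [h, hlt, hmax] using
        ih res m (errs ++ ["Error: " ++ PySem.Int.toStr r.1 ++ " not ascending from " ++ PySem.Int.toStr m])

-- ===== VERDICT (by name: the statement is the Claim_ definition above) =====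
theorem checkascending_spec : Claim_equal_checkascending := by
  intro rs errors _
  unfold Spec_checkascending checkascending checkascending_alt
  have h := pv_loop_eq rs [] 0 errors
  simp only [Prod.mk.injEq] at *
  rw [← h]
  exact ⟨rfl, rfl⟩
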